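-- pv_equiv track=rewrite | github.com/nicorf12/TDAgrupo | TP3/solucion_aproximacion.py | aproximacion_tribu_agua
-- ===== SOURCE A (Python) =====
-- import heapq
--
-- def aproximacion_tribu_agua(k, habilidades):
--     maestros_ordenados = sorted(habilidades.values(), reverse=True)
--
--     heap = [(0, i) for i in range(k)]
--     heapq.heapify(heap)
--
--     grupos = [[] for _ in range(k)]
--
--     for maestro in maestros_ordenados:
--         suma_actual, grupo_index = heapq.heappop(heap)
--         grupos[grupo_index].append(maestro)
--         nueva_suma = suma_actual + maestro
--         heapq.heappush(heap, (nueva_suma, grupo_index))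
--
--     suma_cuadrados_total = sum(sum(grupo) ** 2 for grupo in grupos)
--
--     return suma_cuadrados_total
-- ===== SOURCE B (Python) =====
-- def aproximacion_tribu_agua(k, habilidades):
--     sumas = [0] * k
--     for maestro in sorted(habilidades.values(), reverse=True):
--         i = min(range(k), key=lambda j: sumas[j])
--         sumas[i] += maestro
--     return sum(s * s for s in sumas)
-- ===== Notes on version B (the rewrite author's own statement) =====
-- stated objective: simpler
-- what changed: Drops the heap and the per-group element lists entirely: keeps only a flat array of k running group sums, picks the target group by a plain linear argmin scan (Python min over range(k), whose first-minimum rule equals the heap's lowest-index tie-break), and squares the sums at the end.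
import Mathlib
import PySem

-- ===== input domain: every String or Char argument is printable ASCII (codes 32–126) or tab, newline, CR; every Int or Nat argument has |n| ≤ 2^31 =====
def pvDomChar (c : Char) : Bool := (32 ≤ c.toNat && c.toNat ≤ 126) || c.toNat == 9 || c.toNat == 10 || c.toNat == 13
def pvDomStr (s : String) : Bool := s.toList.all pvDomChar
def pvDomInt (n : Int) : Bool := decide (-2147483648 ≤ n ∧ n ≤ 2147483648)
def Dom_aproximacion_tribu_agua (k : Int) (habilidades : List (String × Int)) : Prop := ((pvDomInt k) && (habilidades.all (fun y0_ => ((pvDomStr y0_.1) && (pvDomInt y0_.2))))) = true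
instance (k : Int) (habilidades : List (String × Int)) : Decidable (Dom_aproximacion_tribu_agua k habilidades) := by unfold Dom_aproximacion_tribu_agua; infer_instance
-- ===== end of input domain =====

-- B drops A's heap and per-group element lists entirely: it keeps only a flat list of k running
-- group sums, picks the target group by a linear argmin scan (Python min over range(k), whose
-- first-minimum rule equals the heap's lowest-index tie-break), and squares the sums: simpler.


-- ===== PORT A =====
-- heapq is not covered by PySem, so it is ported by its exact semantics: heappop returns the
-- least element of the heap in Python tuple (lexicographic) order and removes that occurrence,
-- heappush adds its element, heapify only establishes the internal array arrangement.  In this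
-- program every heap element carries a distinct group index as its second component, so the
-- popped pair and the surviving multiset — the only things the program ever observes — are
-- exactly the lexicographic minimum and the list with that (unique) occurrence erased; the
-- heap's internal array order is unobservable through heappop/heappush.
def pvLexLt (a b : Int × Int) : Bool := a.1 < b.1 || (a.1 == b.1 && a.2 < b.2)

def pvHeapMin (x : Int × Int) (t : List (Int × Int)) : Int × Int :=
  t.foldl (fun a y => if pvLexLt y a then y else a) x

-- loop body of A's 'for maestro in maestros_ordenados' (state = (heap, grupos))
def pvStepA (st : List (Int × Int) × List (List Int)) (maestro : Int) :
    List (Int × Int) × List (List Int) :=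
  match st.1 with
  | [] => st          -- heappop of an empty heap: IndexError, excluded by Pre_
  | x :: t =>
    let p := pvHeapMin x t                              -- (suma_actual, grupo_index) = heappop(heap)
    let grupos := st.2.set p.2.toNat (st.2.getD p.2.toNat [] ++ [maestro])  -- grupo_index ≥ 0 and in range here
    let nueva_suma := p.1 + maestro
    (((x :: t).erase p) ++ [(nueva_suma, p.2)], grupos) -- heappush(heap, (nueva_suma, grupo_index))

def aproximacion_tribu_agua (k : Int) (habilidades : List (String × Int)) : Int :=
  let maestros_ordenados := PySem.List.sorted (PySem.Dict.ofList habilidades).values (fun v => v) true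
  let heap := (PySem.List.pyRange 0 k 1).map (fun i => ((0 : Int), i))
  -- heapq.heapify(heap): rearranges the internal array only (see the heapq comment above)
  let grupos := (PySem.List.pyRange 0 k 1).map (fun _ => ([] : List Int))
  let fin := maestros_ordenados.foldl pvStepA (heap, grupos)
  (fin.2.map (fun grupo => grupo.sum ^ 2)).sum

-- ===== PORT B =====
-- Python's min(iterable, key=…) is ported by hand as its exact loop: keep the current best,
-- replace it only when the new key is STRICTLY smaller (so the FIRST minimum wins); min of an
-- empty iterable raises ValueError, here none (excluded by Pre_).
def pvMinBy (l : List Int) (key : Int → Int) : Option Int :=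
  match l with
  | [] => none
  | x :: t => some (t.foldl (fun b y => if key y < key b then y else b) x)

-- loop body of B's 'for maestro in ...' over the list of k running group sums
def pvStepB (k : Int) (sumas : List Int) (maestro : Int) : List Int :=
  match pvMinBy (PySem.List.pyRange 0 k 1) (fun j => sumas.getD j.toNat 0) with
  | none => sumas    -- min() of an empty range: ValueError, excluded by Pre_
  | some i => sumas.set i.toNat (sumas.getD i.toNat 0 + maestro)   -- sumas[i] += maestro

def aproximacion_tribu_agua_alt (k : Int) (habilidades : List (String × Int)) : Int :=
  let sumas := List.replicate k.toNat (0 : Int)            -- [0] * k  ([] for k ≤ 0)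
  let sumas := (PySem.List.sorted (PySem.Dict.ofList habilidades).values (fun v => v) true).foldl
    (pvStepB k) sumas
  (sumas.map (fun s => s * s)).sum

-- ===== PRECONDITION & SPEC =====
-- Pre_ excludes only the inputs where Python A raises: a nonempty dict with k ≤ 0 makes
-- heappop fail on an empty heap (IndexError).  A returns normally everywhere else.
def Pre_aproximacion_tribu_agua (k : Int) (habilidades : List (String × Int)) : Prop :=
  habilidades = [] ∨ 1 ≤ k
instance (k : Int) (habilidades : List (String × Int)) : Decidable (Pre_aproximacion_tribu_agua k habilidades) := by unfold Pre_aproximacion_tribu_agua; infer_instance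

def pvWitness_aproximacion_tribu_agua : Int × (List (String × Int)) := (2, [("a", 3), ("b", 1), ("c", 2)])

def Spec_aproximacion_tribu_agua (k : Int) (habilidades : List (String × Int)) (out : Int) : Prop := out = aproximacion_tribu_agua_alt k habilidades
instance (k : Int) (habilidades : List (String × Int)) (out : Int) : Decidable (Spec_aproximacion_tribu_agua k habilidades out) := by unfold Spec_aproximacion_tribu_agua; infer_instance

-- ===== CLAIM (what is proved, stated in full; the proofs are below) =====
def Claim_equal_aproximacion_tribu_agua : Prop := ∀ (k : Int) (habilidades : List (String × Int)), Dom_aproximacion_tribu_agua k habilidades → Pre_aproximacion_tribu_agua k habilidades → Spec_aproximacion_tribu_agua k habilidades (aproximacion_tribu_agua k habilidades)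

-- ===== LEMMAS AND PROOFS =====

-- the multiset A's heap holds, read off from the running group sums
def pvPairs (sumas : List Int) : List (Int × Int) :=
  (List.range sumas.length).map (fun i => (sumas.getD i 0, (i : Int)))

-- order facts about pvLexLt
theorem pvLexLt_antisymm {a b : Int × Int} (h1 : pvLexLt a b = false) (h2 : pvLexLt b a = false) :
    a = b := by
  simp [pvLexLt] at h1 h2
  have : a.1 = b.1 ∧ a.2 = b.2 := by omega
  exact Prod.ext this.1 this.2

theorem pvLexLt_irrefl (a : Int × Int) : pvLexLt a a = false := by simp [pvLexLt]

theorem pvLexLt_elim {x y m : Int × Int} (h1 : pvLexLt y x = true) (h2 : pvLexLt y m = false) :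
    pvLexLt x m = false := by
  simp [pvLexLt] at *; omega

theorem pvLexLt_trans_false {x y m : Int × Int} (h1 : pvLexLt x m = false)
    (h2 : pvLexLt y x = false) : pvLexLt y m = false := by
  simp [pvLexLt] at *; omega

def pvIsMin (l : List (Int × Int)) (p : Int × Int) : Prop :=
  p ∈ l ∧ ∀ q ∈ l, pvLexLt q p = false

theorem pvHeapMin_aux (t : List (Int × Int)) : ∀ x : Int × Int,
    (pvHeapMin x t = x ∨ pvHeapMin x t ∈ t) ∧ pvLexLt x (pvHeapMin x t) = false ∧
      ∀ q ∈ t, pvLexLt q (pvHeapMin x t) = false := by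
  induction t with
  | nil => intro x; exact ⟨Or.inl rfl, pvLexLt_irrefl x, by simp⟩
  | cons y t ih =>
    intro x
    have hstep : pvHeapMin x (y :: t) = pvHeapMin (if pvLexLt y x then y else x) t := rfl
    rcases ih (if pvLexLt y x then y else x) with ⟨hmem, hzle, hall⟩
    by_cases hc : pvLexLt y x = true
    · rw [hc] at hmem hzle hall
      simp only [if_true] at hmem hzle hall
      refine ⟨?_, ?_, ?_⟩
      · rw [hstep, hc, if_pos rfl]
        rcases hmem with h | h
        · rw [h]; exact Or.inr (List.mem_cons_self ..)
        · exact Or.inr (List.mem_cons_of_mem _ h)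
      · rw [hstep, hc, if_pos rfl]
        exact pvLexLt_elim hc hzle
      · intro q hq
        rw [hstep, hc, if_pos rfl]
        rcases List.mem_cons.mp hq with h | h
        · exact h ▸ hzle
        · exact hall q h
    · have hc' : pvLexLt y x = false := eq_false_of_ne_true hc
      rw [hc'] at hmem hzle hall
      simp only [if_false, Bool.false_eq_true] at hmem hzle hall
      refine ⟨?_, ?_, ?_⟩
      · rw [hstep, hc']
        simp only [Bool.false_eq_true, if_false]
        rcases hmem with h | h
        · exact Or.inl h
        · exact Or.inr (List.mem_cons_of_mem _ h)
      · rw [hstep, hc']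
        simpa using hzle
      · intro q hq
        rw [hstep, hc']
        simp only [Bool.false_eq_true, if_false]
        rcases List.mem_cons.mp hq with h | h
        · exact h ▸ pvLexLt_trans_false hzle hc'
        · exact hall q h

theorem pvHeapMin_isMin (x : Int × Int) (t : List (Int × Int)) :
    pvIsMin (x :: t) (pvHeapMin x t) := by
  rcases pvHeapMin_aux t x with ⟨hmem, hzle, hall⟩
  refine ⟨?_, ?_⟩
  · rcases hmem with h | h
    · rw [h]; exact List.mem_cons_self ..
    · exact List.mem_cons_of_mem _ h
  · intro q hq
    rcases List.mem_cons.mp hq with h | h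
    · exact h ▸ hzle
    · exact hall q h

theorem pvIsMin_unique {l l' : List (Int × Int)} {p q : Int × Int}
    (hl : l.Perm l') (hp : pvIsMin l p) (hq : pvIsMin l' q) : p = q :=
  pvLexLt_antisymm (hq.2 p (hl.mem_iff.mp hp.1)) (hp.2 q (hl.mem_iff.mpr hq.1))

-- membership/indexing of pvPairs
theorem pvPairs_length (sumas : List Int) : (pvPairs sumas).length = sumas.length := by
  simp [pvPairs]

theorem pvPairs_getElem (sumas : List Int) (i : Nat) (hi : i < sumas.length) :
    (pvPairs sumas)[i]'(by simpa [pvPairs_length]) = (sumas[i], (i : Int)) := by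
  simp [pvPairs, List.getElem?_eq_getElem hi]

-- pvPairs of a point update is a point update
theorem pvPairs_set (sumas : List Int) (j : Nat) (v : Int) (_hj : j < sumas.length) :
    pvPairs (sumas.set j v) = (pvPairs sumas).set j (v, (j : Int)) := by
  apply List.ext_getElem
  · simp [pvPairs_length]
  · intro i h1 h2
    have hi : i < sumas.length := by simpa [pvPairs_length] using h2
    rw [List.getElem_set]
    rw [pvPairs_getElem _ _ (by simpa using hi), pvPairs_getElem _ _ hi, List.getElem_set]
    by_cases h : j = i <;> simp [h]

-- erase the (unique) element at index j, then append: a permutation of the point update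
theorem perm_erase_append_set (L : List (Int × Int)) (j : Nat) (x : Int × Int)
    (hj : j < L.length)
    (hu : ∀ i, (hi : i < L.length) → L[i] = L[j] → i = j) :
    ((L.erase L[j]) ++ [x]).Perm (L.set j x) := by
  set a := L[j] with ha
  have hL : L = L.take j ++ a :: L.drop (j + 1) := by
    rw [ha, List.getElem_cons_drop hj, List.take_append_drop]
  have hnot : a ∉ L.take j := by
    intro hmem
    rcases List.mem_take_iff_getElem.mp hmem with ⟨i, hi, hval⟩
    have hij : i < j := lt_of_lt_of_le hi (min_le_left _ _)
    exact absurd (hu i (lt_trans hij hj) hval) (Nat.ne_of_lt hij)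
  have herase : L.erase a = L.take j ++ L.drop (j + 1) := by
    conv_lhs => rw [hL]
    rw [List.erase_append_right _ hnot, List.erase_cons_head]
  have hset : L.set j x = L.take j ++ x :: L.drop (j + 1) := List.set_eq_take_cons_drop x hj
  rw [herase, hset, List.append_assoc]
  exact (List.Perm.append_left _ (List.perm_append_singleton _ _))

-- the lexicographic (key, element) order that Python's first-minimum min realises
def pvLt2 (key : Int → Int) (a b : Int) : Bool := key a < key b || (key a == key b && a < b)

theorem pvLt2_trans_false {key : Int → Int} {x y m : Int} (h1 : pvLt2 key x m = false)
    (h2 : pvLt2 key y x = false) : pvLt2 key y m = false := by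
  simp [pvLt2] at *; omega

theorem pvLt2_irrefl (key : Int → Int) (a : Int) : pvLt2 key a a = false := by simp [pvLt2]

-- Python's min loop over a strictly increasing list picks the (key, position)-lexicographic minimum
theorem pvMinBy_aux (key : Int → Int) (t : List Int) : ∀ x : Int,
    t.Pairwise (· < ·) → (∀ y ∈ t, x < y) →
    ((t.foldl (fun b y => if key y < key b then y else b) x = x ∨
        t.foldl (fun b y => if key y < key b then y else b) x ∈ t) ∧
      pvLt2 key x (t.foldl (fun b y => if key y < key b then y else b) x) = false ∧
      ∀ y ∈ t, pvLt2 key y (t.foldl (fun b y => if key y < key b then y else b) x) = false) := by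
  induction t with
  | nil => intro x _ _; exact ⟨Or.inl rfl, pvLt2_irrefl key x, by simp⟩
  | cons y t ih =>
    intro x hpw hx
    have hxy : x < y := hx y (List.mem_cons_self ..)
    have hxt : ∀ z ∈ t, (if key y < key x then y else x) < z := by
      intro z hz
      by_cases h : key y < key x
      · rw [if_pos h]; exact (List.pairwise_cons.mp hpw).1 z hz
      · rw [if_neg h]; exact hx z (List.mem_cons_of_mem _ hz)
    rcases ih (if key y < key x then y else x) (List.pairwise_cons.mp hpw).2 hxt with
      ⟨hmem, hzle, hall⟩
    have hstep : (y :: t).foldl (fun b y => if key y < key b then y else b) x =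
        t.foldl (fun b y => if key y < key b then y else b) (if key y < key x then y else x) := rfl
    rw [hstep]
    by_cases hc : key y < key x
    · rw [if_pos hc]
      rw [if_pos hc] at hmem hzle hall
      have hxle : pvLt2 key x y = false := by simp [pvLt2]; omega
      refine ⟨?_, ?_, ?_⟩
      · rcases hmem with h | h
        · refine Or.inr ?_; rw [h]; exact List.mem_cons_self ..
        · exact Or.inr (List.mem_cons_of_mem _ h)
      · exact pvLt2_trans_false hzle hxle
      · intro z hz
        rcases List.mem_cons.mp hz with h | h
        · exact h ▸ hzle
        · exact hall z h
    · rw [if_neg hc]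
      rw [if_neg hc] at hmem hzle hall
      have hyx : pvLt2 key y x = false := by simp [pvLt2] at *; omega
      refine ⟨?_, ?_, ?_⟩
      · rcases hmem with h | h
        · exact Or.inl h
        · exact Or.inr (List.mem_cons_of_mem _ h)
      · exact hzle
      · intro z hz
        rcases List.mem_cons.mp hz with h | h
        · exact h ▸ pvLt2_trans_false hzle hyx
        · exact hall z h

-- lexicographic orders agree through the pairing
theorem pvLexLt_pvLt2 (key : Int → Int) (a b : Int) :
    pvLexLt (key a, a) (key b, b) = pvLt2 key a b := rfl

-- one loop iteration: A's new state keeps the coupling and its group sums are B's new state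
theorem pvStep_couple (k : Int) (hk : 1 ≤ k) (heap : List (Int × Int)) (grupos : List (List Int))
    (m : Int) (hlen : grupos.length = k.toNat)
    (hp : heap.Perm (pvPairs (grupos.map List.sum))) :
    (pvStepA (heap, grupos) m).1.Perm (pvPairs ((pvStepA (heap, grupos) m).2.map List.sum)) ∧
      (pvStepA (heap, grupos) m).2.map List.sum = pvStepB k (grupos.map List.sum) m ∧
      (pvStepA (heap, grupos) m).2.length = k.toNat := by
  set sumas := grupos.map List.sum with hsumas
  have hslen : sumas.length = k.toNat := by simp [hsumas, hlen]
  set key : Int → Int := fun j => sumas.getD j.toNat 0 with hkey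
  -- the range list
  have hcast : ((k.toNat : Nat) : Int) = k := by omega
  have hrange : PySem.List.pyRange 0 k 1 = (List.range k.toNat).map (fun (i : Nat) => (i : Int)) := by
    rw [← hcast]; exact PySem.List.pyRange_zero_natCast k.toNat
  have hrlen : (PySem.List.pyRange 0 k 1).length = k.toNat := by simp [hrange]
  obtain ⟨x, t, hrl⟩ : ∃ x t, PySem.List.pyRange 0 k 1 = x :: t := by
    apply List.exists_cons_of_ne_nil
    intro h; rw [h] at hrlen; simp at hrlen; omega
  have hpw : (PySem.List.pyRange 0 k 1).Pairwise (· < ·) := by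
    rw [hrange]
    exact List.pairwise_map.mpr (List.pairwise_lt_range.imp (fun h => by exact_mod_cast h))
  -- B's chosen index
  set r := t.foldl (fun b y => if key y < key b then y else b) x with hrdef
  have hmin : pvMinBy (PySem.List.pyRange 0 k 1) key = some r := by rw [hrl]; rfl
  rcases pvMinBy_aux key t x (List.pairwise_cons.mp (hrl ▸ hpw)).2
      (List.pairwise_cons.mp (hrl ▸ hpw)).1 with ⟨hmem, hxle, hall⟩
  have hrmem : r ∈ PySem.List.pyRange 0 k 1 := by
    rw [hrl]
    rcases hmem with h | h
    · exact h ▸ List.mem_cons_self ..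
    · exact List.mem_cons_of_mem _ h
  have hrall : ∀ y ∈ PySem.List.pyRange 0 k 1, pvLt2 key y r = false := by
    intro y hy
    rcases List.mem_cons.mp (hrl ▸ hy) with h | h
    · exact h ▸ hxle
    · exact hall y h
  obtain ⟨j0, hj0lt, hj0⟩ : ∃ j0 : Nat, j0 < k.toNat ∧ r = (j0 : Int) := by
    rw [hrange] at hrmem
    rcases List.mem_map.mp hrmem with ⟨j, hj, hje⟩
    exact ⟨j, List.mem_range.mp hj, hje.symm⟩
  have hjs : j0 < sumas.length := by omega
  have hkeyr : key r = sumas[j0] := by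
    rw [hkey, hj0]; simp only [Int.toNat_natCast]; exact List.getD_eq_getElem _ _ hjs
  -- (key r, r) is the lexicographic minimum of the heap's multiset
  have hminP : pvIsMin (pvPairs sumas) (key r, r) := by
    constructor
    · rw [hkeyr, hj0]
      have := pvPairs_getElem sumas j0 hjs
      exact this ▸ List.getElem_mem _
    · intro q hq
      rcases List.mem_iff_getElem.mp hq with ⟨i, hi, hval⟩
      have hi' : i < sumas.length := by simpa [pvPairs_length] using hi
      have hqv : q = (sumas[i], (i : Int)) := by rw [← hval, pvPairs_getElem _ _ hi']
      have hyi : ((i : Int)) ∈ PySem.List.pyRange 0 k 1 := by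
        rw [hrange]
        exact List.mem_map.mpr ⟨i, List.mem_range.mpr (by omega), rfl⟩
      have h2 := hrall (i : Int) hyi
      have hkeyi : key (i : Int) = sumas[i] := by
        rw [hkey]; simp only [Int.toNat_natCast]; exact List.getD_eq_getElem _ _ hi'
      rw [hqv, ← hkeyi]
      exact (pvLexLt_pvLt2 key (i : Int) r).trans h2
  -- A pops exactly (key r, r)
  obtain ⟨hx, ht, hheap⟩ : ∃ hx ht, heap = hx :: ht := by
    apply List.exists_cons_of_ne_nil
    intro h
    have := hp.length_eq
    rw [h, pvPairs_length] at this
    simp [hslen] at this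
    omega
  have hpop : pvHeapMin hx ht = (key r, r) :=
    pvIsMin_unique (hheap ▸ hp) (pvHeapMin_isMin hx ht) hminP
  have hc2 : ((key r, r) : Int × Int).2.toNat = j0 := by simp [hj0]
  have hstepA1 : (pvStepA (heap, grupos) m).1 =
      ((hx :: ht).erase (key r, r)) ++ [(key r + m, r)] := by
    have h0 : (pvStepA (hx :: ht, grupos) m).1 =
        ((hx :: ht).erase (pvHeapMin hx ht)) ++ [((pvHeapMin hx ht).1 + m, (pvHeapMin hx ht).2)] := rfl
    rw [hheap, h0, hpop]
  have hstepA2 : (pvStepA (heap, grupos) m).2 =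
      grupos.set j0 (grupos.getD j0 [] ++ [m]) := by
    have h0 : (pvStepA (hx :: ht, grupos) m).2 =
        grupos.set (pvHeapMin hx ht).2.toNat (grupos.getD (pvHeapMin hx ht).2.toNat [] ++ [m]) := rfl
    rw [hheap, h0, hpop, hc2]
  have hjg : j0 < grupos.length := by omega
  have hgd : grupos.getD j0 [] = grupos[j0] := List.getD_eq_getElem _ _ hjg
  have hsumj : grupos[j0].sum = sumas[j0] := by simp [hsumas]
  have hsums' : (pvStepA (heap, grupos) m).2.map List.sum = sumas.set j0 (key r + m) := by
    rw [hstepA2, hgd, List.map_set, hkeyr, ← hsumas, List.sum_append, hsumj]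
    simp
  have hstepB : pvStepB k sumas m = sumas.set j0 (key r + m) := by
    rw [pvStepB, hmin]
    simp only [hj0, Int.toNat_natCast]
    have : sumas.getD j0 0 = sumas[j0] := List.getD_eq_getElem _ _ hjs
    rw [this, ← hkeyr, hj0]
  -- unique occurrence of the popped pair (second components are distinct)
  have hjP : j0 < (pvPairs sumas).length := by rw [pvPairs_length]; omega
  have hcj : (pvPairs sumas)[j0] = (key r, r) := by
    rw [pvPairs_getElem _ _ hjs, hkeyr, hj0]
  have huniq : ∀ i, (hi : i < (pvPairs sumas).length) →
      (pvPairs sumas)[i] = (pvPairs sumas)[j0]'hjP → i = j0 := by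
    intro i hi hval
    have hi' : i < sumas.length := by simpa [pvPairs_length] using hi
    rw [pvPairs_getElem _ _ hi', hcj] at hval
    have := congrArg Prod.snd hval
    simp [hj0] at this
    omega
  refine ⟨?_, by rw [hsums', hstepB], by rw [hstepA2]; simp [hlen]⟩
  · rw [hstepA1, hsums']
    have h1 : ((hx :: ht).erase (key r, r)).Perm ((pvPairs sumas).erase (key r, r)) :=
      (hheap ▸ hp).erase _
    have h2 := perm_erase_append_set (pvPairs sumas) j0 (key r + m, (j0 : Int)) hjP huniq
    rw [hcj] at h2
    rw [pvPairs_set _ _ _ hjs]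
    have h3 : ((key r + m, r) : Int × Int) = (key r + m, (j0 : Int)) := by rw [hj0]
    rw [h3]
    exact (h1.append (List.Perm.refl _)).trans h2

-- the whole loop: equal final answers from coupled states
theorem pvLoop_couple (k : Int) (hk : 1 ≤ k) (ms : List Int) :
    ∀ (heap : List (Int × Int)) (grupos : List (List Int)),
    grupos.length = k.toNat → heap.Perm (pvPairs (grupos.map List.sum)) →
    (((ms.foldl pvStepA (heap, grupos)).2).map (fun g => g.sum ^ 2)).sum =
      ((ms.foldl (pvStepB k) (grupos.map List.sum)).map (fun s => s * s)).sum := by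
  induction ms with
  | nil =>
    intro heap grupos _ _
    simp [List.map_map, Function.comp_def, pow_two]
  | cons m ms ih =>
    intro heap grupos hlen hp
    rcases pvStep_couple k hk heap grupos m hlen hp with ⟨hp', hB, hlen'⟩
    have := ih (pvStepA (heap, grupos) m).1 (pvStepA (heap, grupos) m).2 hlen' hp'
    simp only [List.foldl_cons]
    rw [← hB]
    simpa using this

-- ===== VERDICT (by name: the statement is the Claim_ definition above) =====
theorem aproximacion_tribu_agua_spec : Claim_equal_aproximacion_tribu_agua := by
  intro k habilidades _ hpre
  unfold Spec_aproximacion_tribu_agua aproximacion_tribu_agua aproximacion_tribu_agua_alt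
  by_cases hk : 1 ≤ k
  · have hcast : ((k.toNat : Nat) : Int) = k := by omega
    have hrange : PySem.List.pyRange 0 k 1 = (List.range k.toNat).map (fun (i : Nat) => (i : Int)) := by
      rw [← hcast]; exact PySem.List.pyRange_zero_natCast k.toNat
    set ms := PySem.List.sorted (PySem.Dict.ofList habilidades).values (fun v => v) true with hms
    have hg0 : ((PySem.List.pyRange 0 k 1).map (fun _ => ([] : List Int))).map List.sum =
        List.replicate k.toNat 0 := by
      rw [hrange, List.map_map]
      simp [Function.comp_def, List.map_const']
    have hlen0 : ((PySem.List.pyRange 0 k 1).map (fun _ => ([] : List Int))).length = k.toNat := by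
      simp [hrange]
    have hpairs0 : ((PySem.List.pyRange 0 k 1).map (fun i => ((0 : Int), i))).Perm
        (pvPairs (List.replicate k.toNat 0)) := by
      rw [hrange, List.map_map]
      apply List.Perm.of_eq
      apply List.ext_getElem
      · simp [pvPairs_length]
      · intro i h1 h2
        have hi : i < k.toNat := by simpa using h1
        rw [pvPairs_getElem _ _ (by simpa using hi)]
        simp
    have := pvLoop_couple k hk ms
      ((PySem.List.pyRange 0 k 1).map (fun i => ((0 : Int), i)))
      ((PySem.List.pyRange 0 k 1).map (fun _ => ([] : List Int)))
      hlen0 (by rw [hg0]; exact hpairs0)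
    rw [hg0] at this
    simpa using this
  · -- k ≤ 0: Pre_ forces habilidades = [], both sides are the empty sum
    have hemp : habilidades = [] := by
      rcases hpre with h | h
      · exact h
      · exact absurd h hk
    subst hemp
    have hvals : (PySem.Dict.ofList ([] : List (String × Int))).values = [] := rfl
    rw [hvals]
    rw [PySem.List.pyRange_one_eq_nil (by omega : k ≤ 0)]
    have : k.toNat = 0 := by omega
    rw [this]
    simp [PySem.List.sorted]
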